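-- pv_equiv track=rewrite | github.com/Seth-Ab/class-Scheduler | remake.py | generate_conflict_lists
-- ===== SOURCE A (Python) =====
-- def generate_conflict_lists(data):
--     # Initialize conflict lists
--     place_conflict = []
--     person_conflict = []
--
--     # Track combinations to identify conflicts
--     instructor_tracker = {}
--     room_tracker = {}
--
--     # Iterate over each record
--     for record in data:
--         # Extract relevant fields
--         days = record.get('days')
--         start = record.get('start')
--         instructor = record.get('instructor')
--         room = record.get('room')
--
--         # Skip records with missing critical information
--         if not (days and start and instructor and room) or instructor == 'Staff':
--             continue
--
--         # Check for conflicts in instructor scheduling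
--         instructor_key = (days, start, instructor)
--         if instructor_key not in instructor_tracker:
--             instructor_tracker[instructor_key] = [record]
--         else:
--             # Check for room conflict
--             for existing in instructor_tracker[instructor_key]:
--                 if existing['room'] != room:
--                     if record not in place_conflict:
--                         place_conflict.append(record)
--                     if existing not in place_conflict:
--                         place_conflict.append(existing)
--             instructor_tracker[instructor_key].append(record)
--
--         # Check for conflicts in room scheduling
--         room_key = (days, start, room)
--         if room_key not in room_tracker:
--             room_tracker[room_key] = [record]
--         else:
--             # Check for instructor conflict
--             for existing in room_tracker[room_key]:
--                 if existing['instructor'] != instructor: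
--                     if record not in person_conflict:
--                         person_conflict.append(record)
--                     if existing not in person_conflict:
--                         person_conflict.append(existing)
--             room_tracker[room_key].append(record)
--
--     return place_conflict, person_conflict
-- ===== SOURCE B (Python) =====
-- def _emit(rec, out, seen):
--     key = tuple(sorted(rec.items(), key=lambda kv: kv[0]))
--     if key not in seen:
--         seen.add(key)
--         out.append(rec)
--
--
-- def _sweep(valid, key_of, val_of):
--     # One linear sweep producing ONE of the two conflict lists.  Per key we keep
--     # only the not-yet-emitted records (which all share one value) plus a
--     # "conflict already triggered" flag; a seen-set of canonicalised records
--     # replaces A's `rec in list` dedup scans.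
--     out = []
--     seen = set()
--     groups = {}
--     for t in valid:
--         rec = t[4]
--         key = key_of(t)
--         val = val_of(t)
--         g = groups.get(key)
--         if g is None:
--             groups[key] = [[rec], val, False]
--         elif val != g[1]:
--             _emit(rec, out, seen)
--             for e in g[0]:
--                 _emit(e, out, seen)
--             g[0] = [rec]
--             g[1] = val
--             g[2] = True
--         else:
--             g[0].append(rec)
--             if g[2]:
--                 _emit(rec, out, seen)
--     return out
--
--
-- def generate_conflict_lists(data):
--     # Stage 1: validate each record once, extracting the four key fields.
--     valid = []
--     for record in data:
--         days = record.get('days')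
--         start = record.get('start')
--         instructor = record.get('instructor')
--         room = record.get('room')
--         if days and start and instructor and room and instructor != 'Staff':
--             valid.append((days, start, instructor, room, record))
--     # Stage 2: the two outputs are independent; compute each with its own sweep.
--     place_conflict = _sweep(valid, lambda t: (t[0], t[1], t[2]), lambda t: t[3])
--     person_conflict = _sweep(valid, lambda t: (t[0], t[1], t[3]), lambda t: t[2])
--     return place_conflict, person_conflict
-- ===== Notes on version B (the rewrite author's own statement) =====
-- stated objective: alternative
-- what changed: B first validates the records in one staged pass, then computes each of the two conflict lists by its own independent linear sweep that keeps per key only the not-yet-emitted records plus a triggered flag and dedups via a global seen-set of canonicalised records, instead of A's single interleaved loop that rescans each tracker group and does 'record in conflict_list' list scans per record.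
import Mathlib
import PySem

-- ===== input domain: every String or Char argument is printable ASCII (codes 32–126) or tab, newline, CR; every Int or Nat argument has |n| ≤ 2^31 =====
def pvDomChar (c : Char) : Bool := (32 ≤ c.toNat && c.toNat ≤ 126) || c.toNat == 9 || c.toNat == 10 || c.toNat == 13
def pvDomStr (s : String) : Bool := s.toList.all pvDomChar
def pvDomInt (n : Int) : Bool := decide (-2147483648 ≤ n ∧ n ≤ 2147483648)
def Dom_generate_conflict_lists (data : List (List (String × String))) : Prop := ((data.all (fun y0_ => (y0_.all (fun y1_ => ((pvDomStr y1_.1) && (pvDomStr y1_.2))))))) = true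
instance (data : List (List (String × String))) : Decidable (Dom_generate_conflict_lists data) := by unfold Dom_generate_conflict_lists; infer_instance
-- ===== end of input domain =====

-- B replaces A's single interleaved loop (which rescans each tracker group and does
-- `record in conflict_list` list scans) by a staged validation pass followed by one
-- independent linear sweep per output, with per-key (pending, common, triggered) state
-- and a global seen-set for dedup; the outputs are identical.
-- Records (Python dicts) are modelled as association lists; lookups go through
-- PySem.Dict.ofList (last value wins, as Python's dict(pairs) construction).

-- ===== PORT A =====
-- record.get(f) on the dict the pair list denotes
def pvField (r : List (String × String)) (f : String) : Option String :=
  (PySem.Dict.ofList r).get? f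

-- Python truthiness of record.get(f): None and '' are falsy
def pvTruthy : Option String → Bool
  | none => false
  | some s => !(s == "")

-- Python dict equality d1 == d2: same size and every key of d1 maps to the same value in d2
def pvDictEq (a b : List (String × String)) : Bool :=
  (PySem.Dict.ofList a).size == (PySem.Dict.ofList b).size &&
    (PySem.Dict.ofList a).items.all (fun kv => (PySem.Dict.ofList b).get? kv.1 == some kv.2)

-- Python 'record in conflict_list' (list membership decided by dict equality)
def pvMemRec (r : List (String × String)) (l : List (List (String × String))) : Bool :=
  l.any (fun e => pvDictEq e r)

-- the shared shape of A's two per-record blocks (instructor block: fld = "room", room block: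
-- fld = "instructor"), a literal transcription of the Python lines; `existing[fld]` is compared
-- through Option equality (exact: every stored record passed the guard, so the field is present)
def stepA (fld : String) (key : String × String × String) (r : List (String × String))
    (tr : PySem.Dict (String × String × String) (List (List (String × String))))
    (cl : List (List (String × String))) :
    PySem.Dict (String × String × String) (List (List (String × String)))
      × List (List (String × String)) :=
  match tr.get? key with
  | none => (tr.insert key [r], cl)
  | some E =>
      let cl := E.foldl (fun cl e =>
        if pvField e fld != pvField r fld then
          let cl := if pvMemRec r cl then cl else cl ++ [r]
          if pvMemRec e cl then cl else cl ++ [e]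
        else cl) cl
      (tr.insert key (E ++ [r]), cl)

def generate_conflict_lists (data : List (List (String × String))) :
    (List (List (String × String))) × (List (List (String × String))) :=
  let st := data.foldl (fun st r =>
    let days := pvField r "days"
    let start := pvField r "start"
    let instructor := pvField r "instructor"
    let room := pvField r "room"
    if !(pvTruthy days && pvTruthy start && pvTruthy instructor && pvTruthy room)
        || instructor == some "Staff" then st
    else
      -- under the guard every field is `some`; the tuple keys use the underlying strings
      let d := days.getD ""
      let s := start.getD ""
      let ins := instructor.getD ""
      let rm := room.getD ""
      let ip := stepA "room" (d, s, ins) r st.1 st.2.2.1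
      let rp := stepA "instructor" (d, s, rm) r st.2.1 st.2.2.2
      (ip.1, rp.1, ip.2, rp.2))
    (PySem.Dict.empty, PySem.Dict.empty, [], [])
  (st.2.2.1, st.2.2.2)

-- ===== PORT B =====
-- a validated record: (days, start, instructor, room, record)
abbrev Rec5 : Type := String × String × String × String × List (String × String)

-- canonical value key of a record: tuple(sorted(rec.items(), key=kv[0]))
def pvCanon (r : List (String × String)) : List (String × String) :=
  PySem.List.sorted (PySem.Dict.ofList r).items (fun kv => kv.1) false

-- _emit(rec, out, seen)
def emitB (r : List (String × String)) (cl : List (List (String × String)))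
    (seen : PySem.Set (List (String × String))) :
    List (List (String × String)) × PySem.Set (List (String × String)) :=
  if PySem.Set.contains seen (pvCanon r) then (cl, seen)
  else (cl ++ [r], PySem.Set.add seen (pvCanon r))

-- the body of _sweep's loop for one validated record
def sweepStep (key : String × String × String) (val : String) (rec : List (String × String))
    (tr : PySem.Dict (String × String × String)
            (List (List (String × String)) × String × Bool))
    (cl : List (List (String × String)))
    (seen : PySem.Set (List (String × String))) :
    PySem.Dict (String × String × String) (List (List (String × String)) × String × Bool)
      × List (List (String × String)) × PySem.Set (List (String × String)) :=
  match tr.get? key with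
  | none => (tr.insert key ([rec], val, false), cl, seen)
  | some (pending, common, triggered) =>
      if val != common then
        let p1 := emitB rec cl seen
        let p2 := pending.foldl (fun p e => emitB e p.1 p.2) p1
        (tr.insert key ([rec], val, true), p2.1, p2.2)
      else
        let tr' := tr.insert key (pending ++ [rec], common, triggered)
        if triggered then
          let p := emitB rec cl seen
          (tr', p.1, p.2)
        else (tr', cl, seen)

-- _sweep(valid, key_of, val_of): one linear sweep producing one conflict list
def pvSweep (keyOf : Rec5 → String × String × String) (valOf : Rec5 → String)
    (valid : List Rec5) : List (List (String × String)) :=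
  (valid.foldl
      (fun st t => sweepStep (keyOf t) (valOf t) t.2.2.2.2 st.1 st.2.1 st.2.2)
      (PySem.Dict.empty, [], PySem.Set.empty)).2.1

def generate_conflict_lists_alt (data : List (List (String × String))) :
    (List (List (String × String))) × (List (List (String × String))) :=
  let valid := data.foldl (fun acc record =>
    let days := pvField record "days"
    let start := pvField record "start"
    let instructor := pvField record "instructor"
    let room := pvField record "room"
    if pvTruthy days && pvTruthy start && pvTruthy instructor && pvTruthy room
        && !(instructor == some "Staff") then
      acc ++ [(days.getD "", start.getD "", instructor.getD "", room.getD "", record)]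
    else acc) []
  (pvSweep (fun t => (t.1, t.2.1, t.2.2.1)) (fun t => t.2.2.2.1) valid,
   pvSweep (fun t => (t.1, t.2.1, t.2.2.2.1)) (fun t => t.2.2.1) valid)

-- ===== PRECONDITION & SPEC =====
def Spec_generate_conflict_lists (data : List (List (String × String))) (out : (List (List (String × String))) × (List (List (String × String)))) : Prop := out = generate_conflict_lists_alt data
instance (data : List (List (String × String))) (out : (List (List (String × String))) × (List (List (String × String)))) : Decidable (Spec_generate_conflict_lists data out) := by unfold Spec_generate_conflict_lists; infer_instance

-- ===== CLAIM (what is proved, stated in full; the proofs are below) =====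
def Claim_equal_generate_conflict_lists : Prop := ∀ (data : List (List (String × String))), Dom_generate_conflict_lists data → Spec_generate_conflict_lists data (generate_conflict_lists data)

-- ===== LEMMAS AND PROOFS =====

-- dict equality is exactly "same sorted items" -------------------------------------------------

theorem perm_sorted_key_eq (l1 l2 : List (String × String))
    (h1 : (l1.map Prod.fst).Nodup) (hp : l1.Perm l2) :
    PySem.List.sorted l1 (fun kv => kv.1) false = PySem.List.sorted l2 (fun kv => kv.1) false := by
  have hsp := PySem.List.sorted_perm l1 (fun kv => kv.1) false
  have hle := PySem.List.sorted_pairwise l1 (fun kv => kv.1)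
  have hnd : ((PySem.List.sorted l1 (fun kv => kv.1) false).map Prod.fst).Nodup :=
    ((hsp.map Prod.fst).nodup_iff).mpr h1
  have hne : (PySem.List.sorted l1 (fun kv => kv.1) false).Pairwise
      (fun a b => Prod.fst a ≠ Prod.fst b) := List.pairwise_map.mp hnd
  have hlt : (PySem.List.sorted l1 (fun kv => kv.1) false).Pairwise
      (fun a b => a.1 < b.1) :=
    (hle.and hne).imp (fun h => lt_of_le_of_ne h.1 h.2)
  exact (PySem.List.sorted_eq_of_perm_of_pairwise_lt l2 _ _ (hsp.trans hp) hlt).symm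

theorem items_perm_of_dictEq {a b : List (String × String)} (h : pvDictEq a b = true) :
    (PySem.Dict.ofList a).items.Perm (PySem.Dict.ofList b).items := by
  unfold pvDictEq at h
  rw [Bool.and_eq_true] at h
  obtain ⟨hsz, hall⟩ := h
  rw [List.all_eq_true] at hall
  have hnd2 := PySem.Dict.nodup_keys_ofList b
  have hsub : (PySem.Dict.ofList a).items ⊆ (PySem.Dict.ofList b).items := by
    intro kv hkv
    have := hall kv hkv
    rw [beq_iff_eq] at this
    exact (PySem.Dict.get?_eq_some_iff_mem_items _ _ _ hnd2).mp this
  have hnd1 : (PySem.Dict.ofList a).items.Nodup :=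
    List.Nodup.of_map Prod.fst (PySem.Dict.nodup_keys_ofList a)
  refine (List.subperm_of_subset hnd1 hsub).perm_of_length_le ?_
  have : (PySem.Dict.ofList a).size = (PySem.Dict.ofList b).size := by
    rwa [beq_iff_eq] at hsz
  exact le_of_eq this.symm

theorem pvDictEq_iff_canon (a b : List (String × String)) :
    pvDictEq a b = true ↔ pvCanon a = pvCanon b := by
  constructor
  · intro h
    exact perm_sorted_key_eq _ _ (PySem.Dict.nodup_keys_ofList a) (items_perm_of_dictEq h)
  · intro h
    unfold pvCanon at h
    have hperm : (PySem.Dict.ofList a).items.Perm (PySem.Dict.ofList b).items := by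
      have h1 := PySem.List.sorted_perm (PySem.Dict.ofList a).items (fun kv => kv.1) false
      have h2 := PySem.List.sorted_perm (PySem.Dict.ofList b).items (fun kv => kv.1) false
      rw [h] at h1
      exact h1.symm.trans h2
    unfold pvDictEq
    rw [Bool.and_eq_true, beq_iff_eq, List.all_eq_true]
    refine ⟨hperm.length_eq, ?_⟩
    intro kv hkv
    rw [beq_iff_eq]
    exact PySem.Dict.get?_of_mem_items _ (hperm.mem_iff.mp hkv) (PySem.Dict.nodup_keys_ofList b)

theorem pvDictEq_refl (a : List (String × String)) : pvDictEq a a = true :=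
  (pvDictEq_iff_canon a a).mpr rfl

-- basic facts about pvMemRec --------------------------------------------------------------------

theorem pvMemRec_append (x r : List (String × String)) (cl : List (List (String × String))) :
    pvMemRec x (cl ++ [r]) = (pvMemRec x cl || pvDictEq r x) := by
  simp [pvMemRec]

-- proof-side names for A's inner-loop pieces ----------------------------------------------------

def dedupAdd (r : List (String × String)) (cl : List (List (String × String))) :
    List (List (String × String)) :=
  if pvMemRec r cl then cl else cl ++ [r]

def aStep (fld : String) (r : List (String × String))
    (cl : List (List (String × String))) (e : List (String × String)) :
    List (List (String × String)) :=
  if pvField e fld != pvField r fld then dedupAdd e (dedupAdd r cl) else cl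

def eStep (fld : String) (rv : Option String)
    (cl : List (List (String × String))) (e : List (String × String)) :
    List (List (String × String)) :=
  if pvField e fld != rv then dedupAdd e cl else cl

theorem stepA_none (fld : String) (key : String × String × String) (r : List (String × String))
    (tr : PySem.Dict (String × String × String) (List (List (String × String))))
    (cl : List (List (String × String))) (h : tr.get? key = none) :
    stepA fld key r tr cl = (tr.insert key [r], cl) := by
  simp [stepA, h]

theorem stepA_some (fld : String) (key : String × String × String) (r : List (String × String))
    (tr : PySem.Dict (String × String × String) (List (List (String × String))))
    (cl E : List (List (String × String))) (h : tr.get? key = some E) :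
    stepA fld key r tr cl = (tr.insert key (E ++ [r]), E.foldl (aStep fld r) cl) := by
  unfold stepA; rw [h]; rfl

-- monotonicity ----------------------------------------------------------------------------------

def MonoSub (cl cl' : List (List (String × String))) : Prop :=
  ∀ x, pvMemRec x cl = true → pvMemRec x cl' = true

theorem monoSub_refl (cl : List (List (String × String))) : MonoSub cl cl := fun _ h => h

theorem monoSub_trans {a b c : List (List (String × String))}
    (h1 : MonoSub a b) (h2 : MonoSub b c) : MonoSub a c := fun x h => h2 x (h1 x h)

theorem monoSub_dedupAdd (r : List (String × String)) (cl : List (List (String × String))) :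
    MonoSub cl (dedupAdd r cl) := by
  intro x h; unfold dedupAdd; split
  · exact h
  · rw [pvMemRec_append, h]; rfl

theorem monoSub_foldl_dedupAdd (p : List (List (String × String)))
    (cl : List (List (String × String))) :
    MonoSub cl (p.foldl (fun cl e => dedupAdd e cl) cl) := by
  induction p generalizing cl with
  | nil => exact monoSub_refl cl
  | cons e p ih => exact monoSub_trans (monoSub_dedupAdd e cl) (ih _)

theorem memRec_dedupAdd_self (r : List (String × String)) (cl : List (List (String × String))) :
    pvMemRec r (dedupAdd r cl) = true := by
  unfold dedupAdd; split
  · assumption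
  · rw [pvMemRec_append, pvDictEq_refl]; simp

theorem memRec_foldl_dedupAdd_of_mem {e : List (String × String)}
    {p : List (List (String × String))} (he : e ∈ p) (cl : List (List (String × String))) :
    pvMemRec e (p.foldl (fun cl e => dedupAdd e cl) cl) = true := by
  induction p generalizing cl with
  | nil => cases he
  | cons a p ih =>
      rcases List.mem_cons.mp he with he | he
      · exact (monoSub_foldl_dedupAdd p _) e (he ▸ memRec_dedupAdd_self a cl)
      · exact ih he _

-- the seen-set invariant ------------------------------------------------------------------------

def SeenInv (cl : List (List (String × String))) (seen : PySem.Set (List (String × String))) :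
    Prop :=
  ∀ x, (pvCanon x ∈ seen ↔ pvMemRec x cl = true)

theorem emitB_eq (r : List (String × String)) (cl : List (List (String × String)))
    (seen : PySem.Set (List (String × String))) (hs : SeenInv cl seen) :
    (emitB r cl seen).1 = dedupAdd r cl ∧ SeenInv (dedupAdd r cl) (emitB r cl seen).2 := by
  unfold emitB dedupAdd
  by_cases hmem : pvCanon r ∈ seen
  · have hm : pvMemRec r cl = true := (hs r).mp hmem
    rw [if_pos ((PySem.Set.contains_iff _ _).mpr hmem), if_pos hm]
    exact ⟨rfl, hs⟩
  · have hm : ¬ pvMemRec r cl = true := fun h => hmem ((hs r).mpr h)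
    rw [if_neg (fun hc => hmem ((PySem.Set.contains_iff _ _).mp hc)), if_neg hm]
    refine ⟨rfl, ?_⟩
    intro x
    rw [PySem.Set.mem_add, pvMemRec_append, Bool.or_eq_true, hs x]
    constructor
    · rintro (h | h)
      · exact Or.inl h
      · exact Or.inr ((pvDictEq_iff_canon r x).mpr h.symm)
    · rintro (h | h)
      · exact Or.inl h
      · exact Or.inr ((pvDictEq_iff_canon r x).mp h).symm

theorem bfold_eq (p : List (List (String × String))) (cl : List (List (String × String)))
    (seen : PySem.Set (List (String × String))) (hs : SeenInv cl seen) :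
    (p.foldl (fun q e => emitB e q.1 q.2) (cl, seen)).1
        = p.foldl (fun cl e => dedupAdd e cl) cl ∧
      SeenInv (p.foldl (fun cl e => dedupAdd e cl) cl)
        (p.foldl (fun q e => emitB e q.1 q.2) (cl, seen)).2 := by
  induction p generalizing cl seen with
  | nil => exact ⟨rfl, hs⟩
  | cons e p ih =>
      obtain ⟨h1, h2⟩ := emitB_eq e cl seen hs
      have hb : emitB e (cl, seen).1 (cl, seen).2 = (dedupAdd e cl, (emitB e cl seen).2) :=
        Prod.ext_iff.mpr ⟨h1, rfl⟩
      rw [List.foldl_cons, List.foldl_cons, hb]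
      exact ih _ _ h2

-- A's inner scan, in three shapes ---------------------------------------------------------------

theorem ascan_absorbed (fld : String) (r : List (String × String))
    (E : List (List (String × String))) (cl : List (List (String × String)))
    (h : pvMemRec r cl = true) :
    E.foldl (aStep fld r) cl = E.foldl (eStep fld (pvField r fld)) cl := by
  induction E generalizing cl with
  | nil => rfl
  | cons e E ih =>
      simp only [List.foldl_cons]
      have hstep : aStep fld r cl e = eStep fld (pvField r fld) cl e := by
        unfold aStep eStep dedupAdd
        rw [h]
        split <;> rfl
      rw [hstep]
      refine ih _ ?_
      unfold eStep
      split
      · exact monoSub_dedupAdd e cl r h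
      · exact h

theorem ascan_first_match (fld : String) (r : List (String × String))
    (E : List (List (String × String))) (cl : List (List (String × String)))
    (h : ∃ e ∈ E, (pvField e fld != pvField r fld) = true) :
    E.foldl (aStep fld r) cl = E.foldl (eStep fld (pvField r fld)) (dedupAdd r cl) := by
  induction E generalizing cl with
  | nil => obtain ⟨e, he, -⟩ := h; cases he
  | cons e E ih =>
      simp only [List.foldl_cons]
      by_cases hm : (pvField e fld != pvField r fld) = true
      · have ha : aStep fld r cl e = dedupAdd e (dedupAdd r cl) := by
          unfold aStep dedupAdd; rw [if_pos hm]
        have hb : eStep fld (pvField r fld) (dedupAdd r cl) e = dedupAdd e (dedupAdd r cl) := by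
          unfold eStep; rw [if_pos hm]
        rw [ha, hb]
        exact ascan_absorbed fld r E _
          (monoSub_dedupAdd e _ r (memRec_dedupAdd_self r cl))
      · have ha : aStep fld r cl e = cl := by
          unfold aStep; rw [if_neg hm]
        have hb : eStep fld (pvField r fld) (dedupAdd r cl) e = dedupAdd r cl := by
          unfold eStep; rw [if_neg hm]
        rw [ha, hb]
        refine ih _ ?_
        obtain ⟨x, hx, hxm⟩ := h
        rcases List.mem_cons.mp hx with hx | hx
        · exact absurd (hx ▸ hxm) hm
        · exact ⟨x, hx, hxm⟩

theorem escan_noop (fld : String) (rv : Option String)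
    (E : List (List (String × String))) (cl : List (List (String × String)))
    (h : ∀ e ∈ E, (pvField e fld != rv) = true → pvMemRec e cl = true) :
    E.foldl (eStep fld rv) cl = cl := by
  induction E with
  | nil => rfl
  | cons e E ih =>
      simp only [List.foldl_cons]
      have he : eStep fld rv cl e = cl := by
        unfold eStep
        split
        · unfold dedupAdd
          rw [if_pos (h e List.mem_cons_self (by assumption))]
        · rfl
      rw [he]
      exact ih fun x hx hm => h x (List.mem_cons_of_mem _ hx) hm

theorem ascan_no_match (fld : String) (r : List (String × String))
    (E : List (List (String × String))) (cl : List (List (String × String)))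
    (h : ∀ e ∈ E, pvField e fld = pvField r fld) :
    E.foldl (aStep fld r) cl = cl := by
  induction E with
  | nil => rfl
  | cons e E ih =>
      simp only [List.foldl_cons]
      have he : aStep fld r cl e = cl := by
        unfold aStep
        rw [if_neg]
        simp [h e List.mem_cons_self]
      rw [he]
      exact ih fun x hx => h x (List.mem_cons_of_mem _ hx)

-- the per-key pending relation ------------------------------------------------------------------

inductive Pend (fld common : String) (cl : List (List (String × String))) :
    List (List (String × String)) → List (List (String × String)) → Prop
  | nil : Pend fld common cl [] []
  | keep {e E p} : pvField e fld = some common → Pend fld common cl E p →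
      Pend fld common cl (e :: E) (e :: p)
  | drop {e E p} : pvMemRec e cl = true → Pend fld common cl E p →
      Pend fld common cl (e :: E) p

theorem Pend_mono {fld common : String} {cl cl' E p : _}
    (hm : MonoSub cl cl') (h : Pend fld common cl E p) : Pend fld common cl' E p := by
  induction h with
  | nil => exact Pend.nil
  | keep hf _ ih => exact Pend.keep hf ih
  | drop hd _ ih => exact Pend.drop (hm _ hd) ih

theorem Pend_subset {fld common : String} {cl E p : _}
    (h : Pend fld common cl E p) : ∀ x ∈ p, x ∈ E := by
  induction h with
  | nil => intro x hx; cases hx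
  | keep hf _ ih =>
      intro x hx
      rcases List.mem_cons.mp hx with hx | hx
      · exact hx ▸ List.mem_cons_self
      · exact List.mem_cons_of_mem _ (ih x hx)
  | drop hd _ ih => intro x hx; exact List.mem_cons_of_mem _ (ih x hx)

theorem Pend_pending_field {fld common : String} {cl E p : _}
    (h : Pend fld common cl E p) : ∀ x ∈ p, pvField x fld = some common := by
  induction h with
  | nil => intro x hx; cases hx
  | keep hf _ ih =>
      intro x hx
      rcases List.mem_cons.mp hx with hx | hx
      · exact hx ▸ hf
      · exact ih x hx
  | drop hd _ ih => exact ih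

theorem Pend_mem_cases {fld common : String} {cl E p : _}
    (h : Pend fld common cl E p) : ∀ e ∈ E, e ∈ p ∨ pvMemRec e cl = true := by
  induction h with
  | nil => intro e he; cases he
  | keep hf _ ih =>
      intro e he
      rcases List.mem_cons.mp he with he | he
      · exact Or.inl (he ▸ List.mem_cons_self)
      · rcases ih e he with h' | h'
        · exact Or.inl (List.mem_cons_of_mem _ h')
        · exact Or.inr h'
  | drop hd _ ih =>
      intro e he
      rcases List.mem_cons.mp he with he | he
      · exact Or.inr (he ▸ hd)
      · exact ih e he

theorem Pend_append {fld common : String} {cl E p E' p' : _}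
    (h : Pend fld common cl E p) (h' : Pend fld common cl E' p') :
    Pend fld common cl (E ++ E') (p ++ p') := by
  induction h with
  | nil => exact h'
  | keep hf _ ih => exact Pend.keep hf ih
  | drop hd _ ih => exact Pend.drop hd ih

theorem Pend_all_drop {fld common : String} {cl : _} {E : List (List (String × String))}
    (h : ∀ e ∈ E, pvMemRec e cl = true) : Pend fld common cl E [] := by
  induction E with
  | nil => exact Pend.nil
  | cons e E ih =>
      exact Pend.drop (h e List.mem_cons_self) (ih fun x hx => h x (List.mem_cons_of_mem _ hx))

theorem escan_pend {fld common fv : String} {cl0 cl' E p : _}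
    (h : Pend fld common cl0 E p) (hm : MonoSub cl0 cl') (hne : fv ≠ common) :
    E.foldl (eStep fld (some fv)) cl' = p.foldl (fun cl e => dedupAdd e cl) cl' := by
  induction h generalizing cl' with
  | nil => rfl
  | @keep e E' p' hf _ ih =>
      simp only [List.foldl_cons]
      have hcond : (pvField e fld != some fv) = true := by
        rw [hf]
        simp only [bne_iff_ne, ne_eq, Option.some.injEq]
        exact fun hc => hne hc.symm
      have hstep : eStep fld (some fv) cl' e = dedupAdd e cl' := by
        unfold eStep
        rw [if_pos hcond]
      rw [hstep]
      exact ih (monoSub_trans hm (monoSub_dedupAdd _ _))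
  | @drop e E' p' hd _ ih =>
      simp only [List.foldl_cons]
      have hstep : ∀ e, pvMemRec e cl' = true → eStep fld (some fv) cl' e = cl' := by
        intro e hme
        unfold eStep
        split
        · unfold dedupAdd; rw [if_pos hme]
        · rfl
      rw [hstep _ (hm _ hd)]
      exact ih hm

-- the per-key relation and per-side invariant ---------------------------------------------------

def KRel (fld : String) (cl : List (List (String × String)))
    (E p : List (List (String × String))) (c : String) (t : Bool) : Prop :=
  p ≠ [] ∧ Pend fld c cl E p ∧
    (if t then ∃ e ∈ E, pvField e fld ≠ some c
     else E = p ∧ ∀ e ∈ E, pvField e fld = some c)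

def SideInv (fld : String)
    (tr : PySem.Dict (String × String × String) (List (List (String × String))))
    (tr' : PySem.Dict (String × String × String)
             (List (List (String × String)) × String × Bool))
    (cl : List (List (String × String))) : Prop :=
  ∀ k, (tr.get? k = none ∧ tr'.get? k = none) ∨
    (∃ E p c t, tr.get? k = some E ∧ tr'.get? k = some (p, c, t) ∧ KRel fld cl E p c t)

theorem sweepStep_none (key : String × String × String) (fv : String)
    (r : List (String × String)) (tr' : PySem.Dict (String × String × String)
      (List (List (String × String)) × String × Bool))
    (cl : List (List (String × String))) (seen : PySem.Set (List (String × String)))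
    (h : tr'.get? key = none) :
    sweepStep key fv r tr' cl seen = (tr'.insert key ([r], fv, false), cl, seen) := by
  unfold sweepStep; rw [h]

theorem sweepStep_some_ne (key : String × String × String) (fv : String)
    (r : List (String × String)) (tr' : PySem.Dict (String × String × String)
      (List (List (String × String)) × String × Bool))
    (cl : List (List (String × String))) (seen : PySem.Set (List (String × String)))
    (p : List (List (String × String))) (c : String) (t : Bool)
    (h : tr'.get? key = some (p, c, t)) (hne : (fv != c) = true) :
    sweepStep key fv r tr' cl seen = (tr'.insert key ([r], fv, true),
      (p.foldl (fun q e => emitB e q.1 q.2) (emitB r cl seen)).1,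
      (p.foldl (fun q e => emitB e q.1 q.2) (emitB r cl seen)).2) := by
  unfold sweepStep; rw [h]; simp only [hne, if_true]

theorem sweepStep_some_eq_t (key : String × String × String) (fv : String)
    (r : List (String × String)) (tr' : PySem.Dict (String × String × String)
      (List (List (String × String)) × String × Bool))
    (cl : List (List (String × String))) (seen : PySem.Set (List (String × String)))
    (p : List (List (String × String))) (c : String)
    (h : tr'.get? key = some (p, c, true)) (heq : (fv != c) = false) :
    sweepStep key fv r tr' cl seen = (tr'.insert key (p ++ [r], c, true),
      (emitB r cl seen).1, (emitB r cl seen).2) := by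
  unfold sweepStep; rw [h]; simp only [heq, Bool.false_eq_true, if_false, if_true]

theorem sweepStep_some_eq_f (key : String × String × String) (fv : String)
    (r : List (String × String)) (tr' : PySem.Dict (String × String × String)
      (List (List (String × String)) × String × Bool))
    (cl : List (List (String × String))) (seen : PySem.Set (List (String × String)))
    (p : List (List (String × String))) (c : String)
    (h : tr'.get? key = some (p, c, false)) (heq : (fv != c) = false) :
    sweepStep key fv r tr' cl seen = (tr'.insert key (p ++ [r], c, false), cl, seen) := by
  unfold sweepStep; rw [h]; simp only [heq, Bool.false_eq_true, if_false]

theorem sideInv_insert (fld : String)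
    (tr : PySem.Dict (String × String × String) (List (List (String × String))))
    (tr' : PySem.Dict (String × String × String)
             (List (List (String × String)) × String × Bool))
    (cl cl' : List (List (String × String))) (key : String × String × String)
    (E' p' : List (List (String × String))) (c' : String) (t' : Bool)
    (hi : SideInv fld tr tr' cl) (hm : MonoSub cl cl') (hK : KRel fld cl' E' p' c' t') :
    SideInv fld (tr.insert key E') (tr'.insert key (p', c', t')) cl' := by
  intro k
  rw [PySem.Dict.get?_insert, PySem.Dict.get?_insert]
  by_cases hk : k = key
  · rw [if_pos hk, if_pos hk]
    exact Or.inr ⟨E', p', c', t', rfl, rfl, hK⟩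
  · rw [if_neg hk, if_neg hk]
    rcases hi k with ⟨h1, h2⟩ | ⟨E, p, c, t, h1, h2, hpne, hP, hT⟩
    · exact Or.inl ⟨h1, h2⟩
    · refine Or.inr ⟨E, p, c, t, h1, h2, hpne, Pend_mono hm hP, ?_⟩
      cases t
      · exact hT
      · exact hT

theorem step_sim (fld fv : String) (key : String × String × String)
    (r : List (String × String))
    (tr : PySem.Dict (String × String × String) (List (List (String × String))))
    (tr' : PySem.Dict (String × String × String)
             (List (List (String × String)) × String × Bool))
    (cl : List (List (String × String))) (seen : PySem.Set (List (String × String)))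
    (hr : pvField r fld = some fv) (hs : SeenInv cl seen) (hi : SideInv fld tr tr' cl) :
    (stepA fld key r tr cl).2 = (sweepStep key fv r tr' cl seen).2.1 ∧
      SeenInv (stepA fld key r tr cl).2 (sweepStep key fv r tr' cl seen).2.2 ∧
      SideInv fld (stepA fld key r tr cl).1 (sweepStep key fv r tr' cl seen).1
        (stepA fld key r tr cl).2 ∧
      MonoSub cl (stepA fld key r tr cl).2 := by
  rcases hi key with ⟨hA, hB⟩ | ⟨E, p, c, t, hA, hB, hpne, hP, hT⟩
  · -- fresh key
    rw [stepA_none fld key r tr cl hA, sweepStep_none key fv r tr' cl seen hB]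
    refine ⟨rfl, hs, ?_, monoSub_refl cl⟩
    refine sideInv_insert fld tr tr' cl cl key [r] [r] fv false hi (monoSub_refl cl) ?_
    refine ⟨List.cons_ne_nil r [], Pend.keep hr Pend.nil, ?_⟩
    rw [if_neg Bool.false_ne_true]
    refine ⟨rfl, ?_⟩
    intro e he
    rcases List.mem_cons.mp he with he | he
    · exact he ▸ hr
    · cases he
  · rw [stepA_some fld key r tr cl E hA]
    by_cases hfc : fv = c
    · have hbne : (fv != c) = false := by simp [hfc]
      cases t
      · -- no conflict yet, same value: nothing happens on either side
        rw [sweepStep_some_eq_f key fv r tr' cl seen p c hB hbne]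
        rw [if_neg (Bool.false_ne_true)] at hT
        obtain ⟨hEp, hall⟩ := hT
        have hscan : E.foldl (aStep fld r) cl = cl :=
          ascan_no_match fld r E cl (fun e he => by rw [hall e he, hr, hfc])
        rw [hscan]
        refine ⟨rfl, hs, ?_, monoSub_refl cl⟩
        refine sideInv_insert fld tr tr' cl cl key (E ++ [r]) (p ++ [r]) c false hi
          (monoSub_refl cl) ?_
        refine ⟨by simp, Pend_append hP (Pend.keep (hfc ▸ hr) Pend.nil), ?_⟩
        rw [if_neg (Bool.false_ne_true)]
        constructor
        · rw [hEp]
        · intro e he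
          rcases List.mem_append.mp he with he | he
          · exact hall e he
          · rcases List.mem_cons.mp he with he | he
            · exact he ▸ (hfc ▸ hr)
            · cases he
      · -- conflict seen before, same value: A emits only the record itself
        rw [sweepStep_some_eq_t key fv r tr' cl seen p c hB hbne]
        rw [if_pos rfl] at hT
        have hex : ∃ e ∈ E, (pvField e fld != pvField r fld) = true := by
          obtain ⟨e, he, hne⟩ := hT
          refine ⟨e, he, ?_⟩
          rw [hr]
          simp only [bne_iff_ne, ne_eq, hfc]
          exact hne
        have hdrop : ∀ e ∈ E, (pvField e fld != pvField r fld) = true →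
            pvMemRec e (dedupAdd r cl) = true := by
          intro e he hne
          rcases Pend_mem_cases hP e he with h' | h'
          · exfalso
            rw [Pend_pending_field hP e h', hr, hfc] at hne
            simp at hne
          · exact monoSub_dedupAdd r cl e h'
        have hscan : E.foldl (aStep fld r) cl = dedupAdd r cl := by
          rw [ascan_first_match fld r E cl hex, escan_noop fld (pvField r fld) E _
            (fun e he hne => hdrop e he hne)]
        obtain ⟨hemit, hseen⟩ := emitB_eq r cl seen hs
        rw [hscan, hemit]
        refine ⟨rfl, hseen, ?_, monoSub_dedupAdd r cl⟩
        refine sideInv_insert fld tr tr' cl (dedupAdd r cl) key (E ++ [r]) (p ++ [r]) c true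
          hi (monoSub_dedupAdd r cl) ?_
        refine ⟨by simp, Pend_append (Pend_mono (monoSub_dedupAdd r cl) hP)
          (Pend.keep (hfc ▸ hr) Pend.nil), ?_⟩
        rw [if_pos rfl]
        obtain ⟨e, he, hne⟩ := hT
        exact ⟨e, List.mem_append_left _ he, hne⟩
    · -- different value: trigger
      have hbne : (fv != c) = true := by simp [bne_iff_ne, hfc]
      rw [sweepStep_some_ne key fv r tr' cl seen p c t hB hbne]
      obtain ⟨hemit, hseen1⟩ := emitB_eq r cl seen hs
      have hpair : emitB r cl seen = (dedupAdd r cl, (emitB r cl seen).2) :=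
        Prod.ext_iff.mpr ⟨hemit, rfl⟩
      obtain ⟨hb1, hb2⟩ := bfold_eq p (dedupAdd r cl) (emitB r cl seen).2 hseen1
      obtain ⟨x, hxp⟩ := List.exists_mem_of_ne_nil p hpne
      have hxE : x ∈ E := Pend_subset hP x hxp
      have hxf : pvField x fld = some c := Pend_pending_field hP x hxp
      have hex : ∃ e ∈ E, (pvField e fld != pvField r fld) = true :=
        ⟨x, hxE, by rw [hxf, hr]; simp [bne_iff_ne]; exact fun h' => hfc h'.symm⟩
      have hscan : E.foldl (aStep fld r) cl
          = p.foldl (fun cl e => dedupAdd e cl) (dedupAdd r cl) := by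
        rw [ascan_first_match fld r E cl hex, hr]
        exact escan_pend hP (monoSub_dedupAdd r cl) hfc
      rw [hpair, hb1, hscan]
      have hmono : MonoSub cl (p.foldl (fun cl e => dedupAdd e cl) (dedupAdd r cl)) :=
        monoSub_trans (monoSub_dedupAdd r cl) (monoSub_foldl_dedupAdd p _)
      refine ⟨rfl, hb2, ?_, hmono⟩
      refine sideInv_insert fld tr tr' cl _ key (E ++ [r]) [r] fv true hi hmono ?_
      refine ⟨List.cons_ne_nil r [], ?_, ?_⟩
      · refine Pend_append (Pend_all_drop ?_) (Pend.keep hr Pend.nil)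
        intro e he
        rcases Pend_mem_cases hP e he with h' | h'
        · exact memRec_foldl_dedupAdd_of_mem h' (dedupAdd r cl)
        · exact hmono e h'
      · rw [if_pos rfl]
        refine ⟨x, List.mem_append_left _ hxE, ?_⟩
        rw [hxf]
        simp only [ne_eq, Option.some.injEq]
        exact fun h' => hfc h'.symm

theorem truthy_some {o : Option String} (h : pvTruthy o = true) : o = some (o.getD "") := by
  cases o with
  | none => cases h
  | some s => rfl

-- staging: B's validation pass as a filterMap ---------------------------------------------------

def keepF (record : List (String × String)) : Option Rec5 :=
  let days := pvField record "days"
  let start := pvField record "start"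
  let instructor := pvField record "instructor"
  let room := pvField record "room"
  if pvTruthy days && pvTruthy start && pvTruthy instructor && pvTruthy room
      && !(instructor == some "Staff") then
    some (days.getD "", start.getD "", instructor.getD "", room.getD "", record)
  else none

theorem extract_eq (data : List (List (String × String))) (acc : List Rec5) :
    data.foldl (fun acc record =>
      let days := pvField record "days"
      let start := pvField record "start"
      let instructor := pvField record "instructor"
      let room := pvField record "room"
      if pvTruthy days && pvTruthy start && pvTruthy instructor && pvTruthy room
          && !(instructor == some "Staff") then
        acc ++ [(days.getD "", start.getD "", instructor.getD "", room.getD "", record)]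
      else acc) acc = acc ++ data.filterMap keepF := by
  induction data generalizing acc with
  | nil => simp
  | cons r data ih =>
      rw [List.foldl_cons, List.filterMap_cons]
      dsimp only
      by_cases hc : (pvTruthy (pvField r "days") && pvTruthy (pvField r "start") &&
          pvTruthy (pvField r "instructor") && pvTruthy (pvField r "room")
          && !(pvField r "instructor" == some "Staff")) = true
      · have hk : keepF r = some ((pvField r "days").getD "", (pvField r "start").getD "",
            (pvField r "instructor").getD "", (pvField r "room").getD "", r) := by
          unfold keepF; dsimp only; rw [if_pos hc]
        rw [if_pos hc, hk, ih]
        simp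
      · have hk : keepF r = none := by
          unfold keepF; dsimp only; rw [if_neg hc]
        rw [if_neg hc, hk, ih]

-- the two guards agree --------------------------------------------------------------------------

theorem guard_bool (a b c d e : Bool) :
    (!(a && b && c && d) || e) = !(a && b && c && d && !e) := by
  cases a <;> cases b <;> cases c <;> cases d <;> cases e <;> rfl

-- A's interleaved fold factors into two per-side folds over the validated list ------------------

theorem factorA (data : List (List (String × String)))
    (t1 t2 : PySem.Dict (String × String × String) (List (List (String × String))))
    (c1 c2 : List (List (String × String))) :
    data.foldl (fun st r =>
      let days := pvField r "days"
      let start := pvField r "start"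
      let instructor := pvField r "instructor"
      let room := pvField r "room"
      if !(pvTruthy days && pvTruthy start && pvTruthy instructor && pvTruthy room)
          || instructor == some "Staff" then st
      else
        let d := days.getD ""
        let s := start.getD ""
        let ins := instructor.getD ""
        let rm := room.getD ""
        let ip := stepA "room" (d, s, ins) r st.1 st.2.2.1
        let rp := stepA "instructor" (d, s, rm) r st.2.1 st.2.2.2
        (ip.1, rp.1, ip.2, rp.2)) (t1, t2, c1, c2)
    = (((data.filterMap keepF).foldl
          (fun st t => stepA "room" (t.1, t.2.1, t.2.2.1) t.2.2.2.2 st.1 st.2) (t1, c1)).1,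
       ((data.filterMap keepF).foldl
          (fun st t => stepA "instructor" (t.1, t.2.1, t.2.2.2.1) t.2.2.2.2 st.1 st.2) (t2, c2)).1,
       ((data.filterMap keepF).foldl
          (fun st t => stepA "room" (t.1, t.2.1, t.2.2.1) t.2.2.2.2 st.1 st.2) (t1, c1)).2,
       ((data.filterMap keepF).foldl
          (fun st t => stepA "instructor" (t.1, t.2.1, t.2.2.2.1) t.2.2.2.2 st.1 st.2) (t2, c2)).2) := by
  induction data generalizing t1 t2 c1 c2 with
  | nil => rfl
  | cons r data ih =>
      rw [List.foldl_cons, List.filterMap_cons]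
      dsimp only
      rw [guard_bool]
      by_cases hg : (pvTruthy (pvField r "days") && pvTruthy (pvField r "start") &&
          pvTruthy (pvField r "instructor") && pvTruthy (pvField r "room")
          && !(pvField r "instructor" == some "Staff")) = true
      · have hk : keepF r = some ((pvField r "days").getD "", (pvField r "start").getD "",
            (pvField r "instructor").getD "", (pvField r "room").getD "", r) := by
          unfold keepF; dsimp only; rw [if_pos hg]
        rw [hg, hk]
        simp only [Bool.not_true, Bool.false_eq_true, if_false]
        rw [List.foldl_cons, List.foldl_cons]
        exact ih _ _ _ _
      · have hk : keepF r = none := by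
          unfold keepF; dsimp only; rw [if_neg hg]
        rw [Bool.eq_false_iff.mpr hg, hk]
        simp only [Bool.not_false, if_true]
        exact ih _ _ _ _

-- one validated side: A's fold against B's sweep ------------------------------------------------

theorem side_loop (fld : String) (keyOf : Rec5 → String × String × String)
    (valOf : Rec5 → String) (v : List Rec5)
    (hv : ∀ t ∈ v, pvField t.2.2.2.2 fld = some (valOf t))
    (trA : PySem.Dict (String × String × String) (List (List (String × String))))
    (trB : PySem.Dict (String × String × String)
             (List (List (String × String)) × String × Bool))
    (cl : List (List (String × String))) (seen : PySem.Set (List (String × String)))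
    (hs : SeenInv cl seen) (hi : SideInv fld trA trB cl) :
    (v.foldl (fun st t => stepA fld (keyOf t) t.2.2.2.2 st.1 st.2) (trA, cl)).2
      = (v.foldl (fun st t => sweepStep (keyOf t) (valOf t) t.2.2.2.2 st.1 st.2.1 st.2.2)
          (trB, cl, seen)).2.1 := by
  induction v generalizing trA trB cl seen with
  | nil => rfl
  | cons t v ih =>
      rw [List.foldl_cons, List.foldl_cons]
      have hS := step_sim fld (valOf t) (keyOf t) t.2.2.2.2 trA trB cl seen
        (hv t List.mem_cons_self) hs hi
      obtain ⟨h1, h2, h3, -⟩ := hS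
      have hA : stepA fld (keyOf t) t.2.2.2.2 trA cl
          = ((stepA fld (keyOf t) t.2.2.2.2 trA cl).1,
             (stepA fld (keyOf t) t.2.2.2.2 trA cl).2) := rfl
      have hB : sweepStep (keyOf t) (valOf t) t.2.2.2.2 trB cl seen
          = ((sweepStep (keyOf t) (valOf t) t.2.2.2.2 trB cl seen).1,
             (stepA fld (keyOf t) t.2.2.2.2 trA cl).2,
             (sweepStep (keyOf t) (valOf t) t.2.2.2.2 trB cl seen).2.2) := by
        rw [h1]
      rw [hA, hB]
      exact ih (fun x hx => hv x (List.mem_cons_of_mem _ hx)) _ _ _ _ h2 h3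

-- the validated tuples really carry their record's field values ---------------------------------

theorem keepF_fields {t : Rec5} {r : List (String × String)} (h : keepF r = some t) :
    pvField t.2.2.2.2 "room" = some t.2.2.2.1
      ∧ pvField t.2.2.2.2 "instructor" = some t.2.2.1 := by
  unfold keepF at h
  dsimp only at h
  split at h
  · rename_i hg
    cases h
    simp only [Bool.and_eq_true] at hg
    obtain ⟨⟨⟨⟨-, -⟩, hti⟩, htr⟩, -⟩ := hg
    exact ⟨truthy_some htr, truthy_some hti⟩
  · cases h

theorem valid_fields (data : List (List (String × String))) :
    ∀ t ∈ data.filterMap keepF,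
      pvField t.2.2.2.2 "room" = some t.2.2.2.1
        ∧ pvField t.2.2.2.2 "instructor" = some t.2.2.1 := by
  intro t ht
  obtain ⟨r, -, hr⟩ := List.mem_filterMap.mp ht
  exact keepF_fields hr

-- ===== VERDICT (by name: the statement is the Claim_ definition above) =====
theorem generate_conflict_lists_spec : Claim_equal_generate_conflict_lists := by
  intro data _
  unfold Spec_generate_conflict_lists generate_conflict_lists generate_conflict_lists_alt pvSweep
  rw [factorA, extract_eq]
  rw [List.nil_append]
  have hsInit : SeenInv [] PySem.Set.empty := fun x => by
    simp [pvMemRec, PySem.Set.empty]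
  have hiInit1 : SideInv "room" PySem.Dict.empty PySem.Dict.empty [] :=
    fun k => Or.inl ⟨PySem.Dict.get?_empty k, PySem.Dict.get?_empty k⟩
  have hiInit2 : SideInv "instructor" PySem.Dict.empty PySem.Dict.empty [] :=
    fun k => Or.inl ⟨PySem.Dict.get?_empty k, PySem.Dict.get?_empty k⟩
  have h1 := side_loop "room" (fun t => (t.1, t.2.1, t.2.2.1)) (fun t => t.2.2.2.1)
    (data.filterMap keepF) (fun t ht => (valid_fields data t ht).1)
    PySem.Dict.empty PySem.Dict.empty [] PySem.Set.empty hsInit hiInit1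
  have h2 := side_loop "instructor" (fun t => (t.1, t.2.1, t.2.2.2.1)) (fun t => t.2.2.1)
    (data.filterMap keepF) (fun t ht => (valid_fields data t ht).2)
    PySem.Dict.empty PySem.Dict.empty [] PySem.Set.empty hsInit hiInit2
  dsimp only
  rw [h1, h2]
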